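-- pv_equiv track=rewrite | github.com/Ashiq-am/Path-of-Python | 3.Data Types/Arrays Set 1 and Set 2/Prefix Sum/Fibonacci sum of a subset with all elements = k/Method 1 (Online Querying).py | buildPrefixFibonacciSum
-- ===== SOURCE A (Python) =====
-- def multiply(F, M):
-- 	x = F[0][0] * M[0][0] + F[0][1] * M[1][0]
-- 	y = F[0][0] * M[0][1] + F[0][1] * M[1][1]
-- 	z = F[1][0] * M[0][0] + F[1][1] * M[1][0]
-- 	w = F[1][0] * M[0][1] + F[1][1] * M[1][1]
--
-- 	F[0][0] = x
-- 	F[0][1] = y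
-- 	F[1][0] = z
-- 	F[1][1] = w
--
-- def power(F, n):
-- 	M = [[1, 1], [1, 0]]
--
-- 	# n - 1 times multiply the
-- 	# matrix to [[1, 0], [0, 1]]
-- 	for i in range(1, n):
-- 		multiply(F, M)
--
-- def fib(n):
-- 	F = [[1, 1], [1, 0]]
-- 	if (n == 0):
-- 		return 0
-- 	power(F, n - 1)
--
-- 	return F[0][0]
--
-- def buildPrefixFibonacciSum(arr, n):
-- 	# Allocate memory to prefix
-- 	# fibonacci sum array
-- 	prefixFibSum = [0]*n
--
-- 	# Traverse the array from 0 to n - 1,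
-- 	# when at the ith index then we calculate
-- 	# the a[i]th fibonacci number and calculate
-- 	# the fibonacci sum till the ith index as
-- 	# the sum of fibonacci sum till index i - 1
-- 	# and the a[i]th fibonacci number
-- 	for i in range(n):
-- 		currFibNumber = fib(arr[i])
-- 		if (i == 0):
-- 			prefixFibSum[i] = currFibNumber
-- 		else:
-- 			prefixFibSum[i] = prefixFibSum[i - 1] + currFibNumber
-- 	return prefixFibSum
-- ===== SOURCE B (Python) =====
-- def fib_iter(k):
--     # standard iterative Fibonacci on a running pair
--     if k == 0:
--         return 0
--     a, b = 1, 0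
--     for _ in range(k - 1):
--         a, b = a + b, a
--     return a
--
-- def buildPrefixFibonacciSum(arr, n):
--     prefix = []
--     total = 0
--     for value in arr[:max(n, 0)]:
--         total += fib_iter(value)
--         prefix.append(total)
--     return prefix
-- ===== Notes on version B (the rewrite author's own statement) =====
-- stated objective: faster
-- what changed: B computes each Fibonacci number with a plain iterative (a,b) pair loop instead of A's repeated 2x2 matrix multiplication, and builds the prefix sums by streaming a running total over arr[:max(n,0)] instead of pre-allocating [0]*n and indexing back into it.
import Mathlib
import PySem

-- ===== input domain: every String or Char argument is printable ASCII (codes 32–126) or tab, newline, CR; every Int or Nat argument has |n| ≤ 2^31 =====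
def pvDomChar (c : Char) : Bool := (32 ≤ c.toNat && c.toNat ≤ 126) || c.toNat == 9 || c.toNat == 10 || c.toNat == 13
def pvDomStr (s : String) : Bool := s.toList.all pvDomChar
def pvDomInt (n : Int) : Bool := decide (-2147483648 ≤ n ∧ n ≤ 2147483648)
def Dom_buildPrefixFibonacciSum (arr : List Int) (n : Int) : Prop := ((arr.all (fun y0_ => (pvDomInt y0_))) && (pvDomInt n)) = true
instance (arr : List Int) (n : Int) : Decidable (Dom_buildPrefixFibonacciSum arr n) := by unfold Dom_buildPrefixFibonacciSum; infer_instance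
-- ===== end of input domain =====

-- B replaces A's per-element 2x2-matrix Fibonacci loop by a plain iterative pair loop and
-- builds the prefix sums by streaming a running total (objective: faster, constant factor).
-- ===== PORT A =====
-- multiply(F, M): Python mutates F in place; ported as returning the new matrix (flat 4-tuple).
def pvMultiply (F M : Int × Int × Int × Int) : Int × Int × Int × Int :=
  (F.1 * M.1 + F.2.1 * M.2.2.1,
   F.1 * M.2.1 + F.2.1 * M.2.2.2,
   F.2.2.1 * M.1 + F.2.2.2 * M.2.2.1,
   F.2.2.1 * M.2.1 + F.2.2.2 * M.2.2.2)

def pvPower (F : Int × Int × Int × Int) (n : Int) : Int × Int × Int × Int :=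
  let M : Int × Int × Int × Int := (1, 1, 1, 0)
  (PySem.List.pyRange 1 n 1).foldl (fun F _ => pvMultiply F M) F

def pvFibA (n : Int) : Int :=
  let F : Int × Int × Int × Int := (1, 1, 1, 0)
  if n = 0 then 0
  else (pvPower F (n - 1)).1

def buildPrefixFibonacciSum (arr : List Int) (n : Int) : List Int :=
  let prefixFibSum : List Int := List.replicate n.toNat 0   -- [0]*n ([] for n ≤ 0)
  (PySem.List.pyRange 0 n 1).foldl
    (fun pfs i =>
      let currFibNumber := pvFibA (PySem.List.pyGetD arr i 0)  -- arr[i]; in range under Pre_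
      if i = 0 then pfs.set i.toNat currFibNumber              -- prefixFibSum[i] = …; i in range(n)
      else pfs.set i.toNat (PySem.List.pyGetD pfs (i - 1) 0 + currFibNumber))
    prefixFibSum

-- ===== PORT B =====
def pvFibIter (k : Int) : Int :=
  if k = 0 then 0
  else ((PySem.List.pyRange 0 (k - 1) 1).foldl
          (fun (p : Int × Int) _ => (p.1 + p.2, p.1)) (1, 0)).1

def buildPrefixFibonacciSum_alt (arr : List Int) (n : Int) : List Int :=
  ((PySem.List.slice arr none (some (max n 0))).foldl
      (fun (st : Int × List Int) value =>
        let t := st.1 + pvFibIter value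
        (t, st.2 ++ [t]))
      (0, [])).2

-- ===== PRECONDITION & SPEC =====
-- A raises IndexError (arr[i]) exactly when n > len(arr); those inputs are excluded.
def Pre_buildPrefixFibonacciSum (arr : List Int) (n : Int) : Prop := n ≤ (arr.length : Int)
instance (arr : List Int) (n : Int) : Decidable (Pre_buildPrefixFibonacciSum arr n) := by
  unfold Pre_buildPrefixFibonacciSum; infer_instance
def pvWitness_buildPrefixFibonacciSum : List Int × Int := ([1, 2, 3], 3)

def Spec_buildPrefixFibonacciSum (arr : List Int) (n : Int) (out : List Int) : Prop := out = buildPrefixFibonacciSum_alt arr n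
instance (arr : List Int) (n : Int) (out : List Int) : Decidable (Spec_buildPrefixFibonacciSum arr n out) := by unfold Spec_buildPrefixFibonacciSum; infer_instance

-- ===== CLAIM (what is proved, stated in full; the proofs are below) =====
def Claim_equal_buildPrefixFibonacciSum : Prop := ∀ (arr : List Int) (n : Int), Dom_buildPrefixFibonacciSum arr n → Pre_buildPrefixFibonacciSum arr n → Spec_buildPrefixFibonacciSum arr n (buildPrefixFibonacciSum arr n)

-- ===== LEMMAS AND PROOFS =====

-- the pair step of B's inner loop
def pvStep2 (p : Int × Int) : Int × Int := (p.1 + p.2, p.1)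

lemma foldl_iter {α : Type} (g : α → α) : ∀ (l : List Int) (s : α),
    l.foldl (fun x _ => g x) s = g^[l.length] s := by
  intro l
  induction l with
  | nil => intro s; rfl
  | cons x xs ih =>
      intro s
      simp [List.foldl_cons, ih, Function.iterate_succ_apply]

lemma multiply_unit (a b c d : Int) :
    pvMultiply (a, b, c, d) (1, 1, 1, 0) = (a + b, a, c + d, c) := by
  simp [pvMultiply]

lemma iterate_pair (m : Nat) : ∀ (a b c d : Int),
    (fun F => pvMultiply F (1, 1, 1, 0))^[m] (a, b, c, d)
      = ((pvStep2^[m] (a, b)).1, (pvStep2^[m] (a, b)).2,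
         (pvStep2^[m] (c, d)).1, (pvStep2^[m] (c, d)).2) := by
  induction m with
  | zero => intro a b c d; rfl
  | succ m ih =>
      intro a b c d
      rw [Function.iterate_succ_apply, Function.iterate_succ_apply, Function.iterate_succ_apply]
      simp only [multiply_unit]
      exact ih (a + b) a (c + d) c

lemma fibA_eq_fibIter (k : Int) : pvFibA k = pvFibIter k := by
  unfold pvFibA pvFibIter pvPower
  by_cases h0 : k = 0
  · simp [h0]
  · simp only [if_neg h0]
    rw [show (fun (F : Int × Int × Int × Int) (_ : Int) => pvMultiply F (1,1,1,0))
          = (fun x _ => (fun F => pvMultiply F (1,1,1,0)) x) from rfl,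
        foldl_iter]
    rw [show (fun (p : Int × Int) (_ : Int) => (p.1 + p.2, p.1))
          = (fun x _ => pvStep2 x) from rfl,
        foldl_iter]
    rw [PySem.List.length_pyRange_one, PySem.List.length_pyRange_one]
    by_cases h2 : 2 ≤ k
    · have : (k - 1 - 0).toNat = (k - 1 - 1).toNat + 1 := by omega
      rw [this, Function.iterate_succ_apply]
      rw [show pvStep2 (1, 0) = ((1 : Int), (1 : Int)) from rfl]
      rw [iterate_pair]
    · have h1 : (k - 1 - 1).toNat = 0 := by omega
      have h1' : (k - 1 - 0).toNat = 0 := by omega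
      rw [h1, h1']
      rfl

-- the running-total scan B produces
def pvScan (t : Int) : List Int → List Int
  | [] => []
  | v :: r => (t + pvFibIter v) :: pvScan (t + pvFibIter v) r

lemma scan_snoc (l : List Int) : ∀ (t x : Int),
    pvScan t (l ++ [x]) = pvScan t l ++ [t + (l.map pvFibIter).sum + pvFibIter x] := by
  induction l with
  | nil => intro t x; simp [pvScan]
  | cons v r ih =>
      intro t x
      simp only [List.cons_append, pvScan, ih, List.map_cons, List.sum_cons]
      ring_nf

lemma scan_length (l : List Int) : ∀ t, (pvScan t l).length = l.length := by
  induction l with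
  | nil => intro t; rfl
  | cons v r ih => intro t; simp [pvScan, ih]

lemma scan_last (l : List Int) : ∀ t, l ≠ [] →
    (pvScan t l).getD (l.length - 1) 0 = t + (l.map pvFibIter).sum := by
  induction l with
  | nil => intro t h; exact absurd rfl h
  | cons v r ih =>
      intro t _
      cases r with
      | nil => simp [pvScan]
      | cons w s =>
          have ih' := ih (t + pvFibIter v) (by simp)
          simp only [List.length_cons, Nat.add_sub_cancel] at ih'
          rw [show pvScan t (v :: w :: s)
                = (t + pvFibIter v) :: pvScan (t + pvFibIter v) (w :: s) from rfl]
          simp only [List.length_cons, Nat.add_sub_cancel, List.getD_cons_succ]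
          rw [ih']
          simp only [List.map_cons, List.sum_cons]
          ring

lemma set_append_len {α : Type} : ∀ (l₁ l₂ : List α) (v : α),
    (l₁ ++ l₂).set l₁.length v = l₁ ++ l₂.set 0 v := by
  intro l₁
  induction l₁ with
  | nil => intro l₂ v; rfl
  | cons x xs ih => intro l₂ v; simp [ih]

-- B's fold, characterised by pvScan
lemma foldB (l : List Int) : ∀ (t : Int) (acc : List Int),
    (l.foldl (fun (st : Int × List Int) value =>
        let t := st.1 + pvFibIter value
        (t, st.2 ++ [t])) (t, acc)).2 = acc ++ pvScan t l := by
  induction l with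
  | nil => intro t acc; simp [pvScan]
  | cons v r ih =>
      intro t acc
      simp only [List.foldl_cons, pvScan]
      rw [ih]
      simp

-- A's loop body, after rewriting fibA to fibIter
lemma loopA (arr : List Int) (N : Nat) (hN : N ≤ arr.length) :
    ∀ (k : Nat), k ≤ N →
      (PySem.List.pyRange 0 (k : Int) 1).foldl
        (fun pfs i =>
          if i = 0 then pfs.set i.toNat (pvFibIter (PySem.List.pyGetD arr i 0))
          else pfs.set i.toNat
            (PySem.List.pyGetD pfs (i - 1) 0 + pvFibIter (PySem.List.pyGetD arr i 0)))
        (List.replicate N 0)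
      = pvScan 0 (arr.take k) ++ List.replicate (N - k) 0 := by
  intro k
  induction k with
  | zero =>
      intro _
      rw [PySem.List.pyRange_one_eq_nil (by norm_num)]
      simp [pvScan]
  | succ k ih =>
      intro hk
      have hkN : k < N := hk
      have hkA : k < arr.length := lt_of_lt_of_le hkN hN
      have hcast : ((k + 1 : Nat) : Int) = (k : Int) + 1 := by push_cast; ring
      rw [hcast, PySem.List.pyRange_one_succ_right (by positivity), List.foldl_append,
          ih (Nat.le_of_lt hkN)]
      simp only [List.foldl_cons, List.foldl_nil]
      have harr : PySem.List.pyGetD arr (k : Int) 0 = arr[k] := by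
        rw [PySem.List.pyGetD_natCast]
        exact List.getD_eq_getElem arr 0 hkA
      have hP : (pvScan 0 (arr.take k)).length = k := by
        rw [scan_length, List.length_take]; omega
      have htake : arr.take (k + 1) = arr.take k ++ [arr[k]] := by
        rw [List.take_add_one]
        simp [List.getElem?_eq_getElem hkA]
      by_cases hk0 : (k : Int) = 0
      · have hkz : k = 0 := by exact_mod_cast hk0
        subst hkz
        rw [if_pos hk0]
        simp only [Nat.cast_zero, Int.toNat_zero]
        have hrep : List.replicate (N - 0) (0 : Int) = 0 :: List.replicate (N - 1) 0 := by
          obtain ⟨m, rfl⟩ : ∃ m, N = m + 1 := ⟨N - 1, by omega⟩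
          simp [List.replicate_succ]
        rw [hrep]
        simp only [List.take_zero, pvScan, List.nil_append, List.set]
        rw [htake]
        simp [pvScan, PySem.List.pyGetD_zero, List.getElem?_eq_getElem hkA]
      · have hkpos : 1 ≤ k := by omega
        rw [if_neg hk0]
        have hi : ((k : Int)).toNat = k := Int.toNat_natCast k
        have hprev : (k : Int) - 1 = ((k - 1 : Nat) : Int) := by push_cast [hkpos]; ring
        rw [hi, hprev, PySem.List.pyGetD_natCast]
        have hlt : k - 1 < (pvScan 0 (arr.take k)).length := by omega
        rw [List.getD_append _ _ _ _ hlt]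
        have hlast : (pvScan 0 (arr.take k)).getD (k - 1) 0
            = 0 + ((arr.take k).map pvFibIter).sum := by
          have hne : arr.take k ≠ [] := by
            intro h
            have hlen := congrArg List.length h
            simp only [List.length_take, List.length_nil] at hlen
            omega
          have := scan_last (arr.take k) 0 hne
          rw [List.length_take] at this
          rw [show min k arr.length = k by omega] at this
          exact this
        rw [hlast]
        have hset := set_append_len (pvScan 0 (arr.take k)) (List.replicate (N - k) (0 : Int))
          (0 + ((arr.take k).map pvFibIter).sum + pvFibIter arr[k])
        rw [hP] at hset
        rw [harr, hset]
        have hrep : List.replicate (N - k) (0 : Int) = 0 :: List.replicate (N - (k + 1)) 0 := by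
          rw [show N - k = (N - (k + 1)) + 1 by omega, List.replicate_succ]
        rw [hrep]
        simp only [List.set]
        rw [htake, scan_snoc]
        simp [List.append_assoc]

-- ===== VERDICT (by name: the statement is the Claim_ definition above) =====
theorem buildPrefixFibonacciSum_spec : Claim_equal_buildPrefixFibonacciSum := by
  intro arr n _ hpre
  unfold Spec_buildPrefixFibonacciSum buildPrefixFibonacciSum buildPrefixFibonacciSum_alt
  simp only [fibA_eq_fibIter]
  by_cases hn : n ≤ 0
  · rw [PySem.List.pyRange_one_eq_nil hn]
    rw [show max n 0 = 0 by omega, PySem.List.slice_to arr (le_refl 0), foldB]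
    simp [pvScan, show n.toNat = 0 by omega]
  · replace hn : 0 < n := by omega
    have hmax : max n 0 = n := by omega
    have hNarr : n.toNat ≤ arr.length := by
      unfold Pre_buildPrefixFibonacciSum at hpre; omega
    rw [hmax, PySem.List.slice_to arr (le_of_lt hn), foldB]
    rw [show n = ((n.toNat : Nat) : Int) by omega]
    simp only [Int.toNat_natCast]
    rw [loopA arr n.toNat hNarr n.toNat (le_refl _)]
    simp
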